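-- pv_equiv track=rewrite | github.com/JohannaTrost/closure_minimum_coverage | calculs.py | minimal_coverage
-- ===== SOURCE A (Python) =====
-- import copy
--
-- def closure_attributes(dfs, attributes):
--     """
--     La fermeture d'un ensemble d'attributs décide de l’implication logique
--     des DFs selon Algorithme 1 de TP_Prog
--
--     :param dfs: une liste des listes contenant les DFs
--     :param attributes: l'ensemble d'attributs en string
--     :return: un string avec la fermeture
--     """
--
--     closure = str(attributes)
--     unused = copy.deepcopy(dfs)  # les dfs pas encore traitées
--     some_left_to_check = True
--     while some_left_to_check:  # la boucle est terminée s'il n'y avait pas un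
--         # ajout à la fermeture pendant l'itération précédent
--         some_left_to_check = False
--         for df in unused:
--             if all(attr in closure for attr in df[0]):
--                 change = ''.join(
--                     [attr for attr in df[1] if attr not in closure])
--                 if len(change) > 0:
--                     closure += change
--                 some_left_to_check = True
--                 unused.remove(df)
--                 break
--     return ''.join(sorted(closure, key=str.upper))
--
-- def minimal_coverage(dfs):
--     """
--     Calcul d'une couverture minimum donc non redondante pour l'ensemble de DFs
--     Algorithme 2 de TP_Prog
--
--     :param dfs: liste des listes de DFs
--     :return: liste des listes de DFs de la couverture minimum
--     """
--
--     min_coverage = []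
--     for df in dfs:
--         new_df = [df[0],
--                   closure_attributes(dfs + [], df[0])]  # X -> X+ pour X -> Y
--         if new_df not in min_coverage:
--             min_coverage.append(new_df)
--
--     dfs_to_remove = []
--     for df in min_coverage:
--         min_coverage_without_df = [df_tmp for df_tmp in min_coverage if
--                                    df_tmp != df]
--         if is_satisfied(min_coverage_without_df, df):
--             dfs_to_remove.append(df)
--     # min_coverage − dfs_to_remove
--     return [df for df in min_coverage if df not in dfs_to_remove]
--
-- def is_satisfied(epsilon, df):
--     """
--     Décide si un ensemble de DFs epsilon satisfait un DF X -> Y en calculant la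
--     fermeture de X.
--     Si Y est inclu dans cette fermeture alors epsilon satisfait la DF
--
--     :param epsilon: liste des listes de DFs
--     :param df: liste répresentant la DF
--     :return: true si epsilon satisfait df, false sinon
--     """
--
--     closure = closure_attributes(epsilon, df[0])
--     if all(attribute in closure for attribute in df[1]):
--         return True
--     else:
--         return False
-- ===== SOURCE B (Python) =====
-- def _lhs_index(deps):
--     """Reverse index: waiters[c] = indices of dependencies whose left side
--     contains attribute c.  Depends only on deps, so it is built once and
--     shared by every closure computation over the same dependency list."""
--     waiters = {}
--     for j, d in enumerate(deps):
--         for c in set(d[0]):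
--             waiters.setdefault(c, []).append(j)
--     return waiters
--
--
-- def _closure(deps, waiters, attrs, skip):
--     """Attribute closure via dependency counters: missing[j] counts LHS
--     attributes of dependency j not yet in the closure; when an attribute
--     enters the closure, exactly the counters listed in waiters are
--     decremented, so firability is a single counter test.  The dependency at
--     index `skip` (if any) is ignored."""
--     clos = list(attrs)
--     inset = set(clos)
--     missing = [len(set(d[0]) - inset) for d in deps]
--     alive = [j for j in range(len(deps)) if j != skip]
--     while True:
--         i = next((j for j in alive if not missing[j]), None)
--         if i is None:
--             break
--         alive.remove(i)
--         add = [c for c in deps[i][1] if c not in inset]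
--         clos.extend(add)
--         for c in add:
--             if c in inset:
--                 continue
--             inset.add(c)
--             for j in waiters.get(c, ()):
--                 missing[j] -= 1
--     return ''.join(sorted(clos, key=str.upper))
--
--
-- def minimal_coverage(dfs):
--     waiters = _lhs_index(dfs)
--     cov = []
--     for df in dfs:
--         nd = [df[0], _closure(dfs, waiters, df[0], None)]
--         if nd not in cov:
--             cov.append(nd)
--     wcov = _lhs_index(cov)
--     result = []
--     for i, df in enumerate(cov):
--         cl = _closure(cov, wcov, df[0], i)
--         if not all(c in cl for c in df[1]):
--             result.append(df)
--     return result
-- ===== Notes on version B (the rewrite author's own statement) =====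
-- stated objective: alternative
-- what changed: The closure loop's repeated per-pass containment re-tests (all LHS attributes against the closure string) are replaced by maintained dependency counters with a reverse waiters index built once per dependency list and shared across all closure calls (a skip index replaces rebuilding the list in the redundancy phase); firability becomes a single counter test.
import Mathlib
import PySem

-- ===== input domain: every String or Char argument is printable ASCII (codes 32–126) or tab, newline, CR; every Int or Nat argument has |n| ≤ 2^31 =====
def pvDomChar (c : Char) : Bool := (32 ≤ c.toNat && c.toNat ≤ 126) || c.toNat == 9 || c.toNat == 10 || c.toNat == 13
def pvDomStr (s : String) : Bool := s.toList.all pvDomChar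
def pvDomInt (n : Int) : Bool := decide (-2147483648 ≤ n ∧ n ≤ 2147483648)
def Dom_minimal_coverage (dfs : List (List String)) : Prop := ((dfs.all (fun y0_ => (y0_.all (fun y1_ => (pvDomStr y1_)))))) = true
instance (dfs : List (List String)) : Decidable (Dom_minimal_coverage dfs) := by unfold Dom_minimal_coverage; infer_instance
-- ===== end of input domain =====

-- B replaces A's repeated first-eligible rescans (each re-testing LHS containment character by
-- character against the closure string) by dependency counters with a reverse waiters index,
-- built once per dependency list and shared by all closure computations.

-- ===== PORT A =====
-- the inner `for df in unused: if all(attr in closure for attr in df[0]): … break`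
-- (`attr in closure` is a 1-character membership test, exact as List.contains on the chars)
def pvFindDF (unused : List (List String)) (closure : List Char) : Option (List String) :=
  match unused with
  | [] => none
  | df :: rest =>
    if (df.getD 0 "").toList.all (fun a => closure.contains a) then some df
    else pvFindDF rest closure

-- the `while some_left_to_check` loop; one recursive call per fired dependency, so
-- fuel = len(unused)+1 is never exhausted before the loop's own exit
def pvClosLoopA (fuel : Nat) (unused : List (List String)) (closure : List Char) : List Char :=
  match fuel with
  | 0 => closure
  | fuel + 1 =>
    match pvFindDF unused closure with
    | none => closure
    | some df =>
      let change := (df.getD 1 "").toList.filter (fun a => !closure.contains a)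
      let closure' := if 0 < change.length then closure ++ change else closure
      pvClosLoopA fuel ((PySem.List.remove? unused df).getD unused) closure'

def pvClosureAttributesA (dfs : List (List String)) (attributes : String) : String :=
  String.ofList (PySem.List.sorted (pvClosLoopA (dfs.length + 1) dfs attributes.toList)
    (fun c => PySem.Chars.upperChar c) false)

def pvIsSatisfiedA (epsilon : List (List String)) (df : List String) : Bool :=
  let closure := pvClosureAttributesA epsilon (df.getD 0 "")
  if (df.getD 1 "").toList.all (fun a => closure.toList.contains a) then true else false

def minimal_coverage (dfs : List (List String)) : List (List String) :=
  let min_cov := dfs.foldl (fun mc df =>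
    let new_df : List String := [df.getD 0 "", pvClosureAttributesA (dfs ++ []) (df.getD 0 "")]
    if mc.contains new_df then mc else mc ++ [new_df]) []
  let to_remove := min_cov.foldl (fun acc df =>
    if pvIsSatisfiedA (min_cov.filter (fun e => e != df)) df then acc ++ [df] else acc) []
  min_cov.filter (fun df => !to_remove.contains df)

-- ===== PORT B =====
-- _lhs_index: waiters[c] = indices of dependencies whose LHS contains c
def pvLhsIndexGo (deps : List (List String)) (j : Nat) (w : PySem.Dict Char (List Nat)) :
    PySem.Dict Char (List Nat) :=
  match deps with
  | [] => w
  | d :: rest =>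
    pvLhsIndexGo rest (j + 1)
      ((PySem.Set.ofList (d.getD 0 "").toList).foldl
        (fun w c => w.insert c (w.getD c [] ++ [j])) w)

def pvLhsIndex (deps : List (List String)) : PySem.Dict Char (List Nat) :=
  pvLhsIndexGo deps 0 PySem.Dict.empty

-- `for j in waiters.get(c, ()): missing[j] -= 1`
def pvDecr (missing : List Int) (js : List Nat) : List Int :=
  js.foldl (fun m j => m.set j (m.getD j 0 - 1)) missing

-- `for c in add: if c in inset: continue; inset.add(c); decrement waiters[c]`
def pvAddChars (waiters : PySem.Dict Char (List Nat)) (add : List Char)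
    (inset : PySem.Set Char) (missing : List Int) : PySem.Set Char × List Int :=
  add.foldl (fun st c =>
    if PySem.Set.contains st.1 c then st
    else (PySem.Set.add st.1 c, pvDecr st.2 (waiters.getD c []))) (inset, missing)

-- the `while True` worklist loop; one recursive call per fired dependency
def pvClosLoopB (fuel : Nat) (deps : List (List String)) (waiters : PySem.Dict Char (List Nat))
    (clos : List Char) (inset : PySem.Set Char) (missing : List Int) (alive : List Nat) :
    List Char :=
  match fuel with
  | 0 => clos
  | fuel + 1 =>
    match alive.find? (fun j => missing.getD j 0 == 0) with
    | none => clos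
    | some i =>
      let alive' := (PySem.List.remove? alive i).getD alive
      let add := ((deps.getD i []).getD 1 "").toList.filter (fun c => !PySem.Set.contains inset c)
      let st := pvAddChars waiters add inset missing
      pvClosLoopB fuel deps waiters (clos ++ add) st.1 st.2 alive'

def pvClosureB (deps : List (List String)) (waiters : PySem.Dict Char (List Nat))
    (attrs : String) (skip : Option Nat) : String :=
  let clos := attrs.toList
  let inset := PySem.Set.ofList clos
  let missing := deps.map (fun d =>
    ((PySem.Set.diff (PySem.Set.ofList (d.getD 0 "").toList) inset).length : Int))
  let alive := (List.range deps.length).filter (fun j => some j != skip)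
  String.ofList (PySem.List.sorted (pvClosLoopB (deps.length + 1) deps waiters clos inset missing alive)
    (fun c => PySem.Chars.upperChar c) false)

def minimal_coverage_alt (dfs : List (List String)) : List (List String) :=
  let waiters := pvLhsIndex dfs
  let cov := dfs.foldl (fun cov df =>
    let nd : List String := [df.getD 0 "", pvClosureB dfs waiters (df.getD 0 "") none]
    if cov.contains nd then cov else cov ++ [nd]) []
  let wcov := pvLhsIndex cov
  cov.zipIdx.foldl (fun res (p : List String × Nat) =>
    let cl := pvClosureB cov wcov (p.1.getD 0 "") (some p.2)
    if !((p.1.getD 1 "").toList.all (fun c => cl.toList.contains c)) then res ++ [p.1] else res) []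

-- ===== PRECONDITION & SPEC =====
-- Pre_: Python A raises IndexError (df[0] / df[1]) as soon as some dependency has fewer than
-- two components (a too-short dependency always eventually fires on itself), so exactly the
-- inputs where every inner list has length ≥ 2 are the inputs on which A returns.
def Pre_minimal_coverage (dfs : List (List String)) : Prop := ∀ df ∈ dfs, 2 ≤ df.length
instance (dfs : List (List String)) : Decidable (Pre_minimal_coverage dfs) := by
  unfold Pre_minimal_coverage; infer_instance

def pvWitness_minimal_coverage : List (List String) := [["ab", "c"], ["c", "d"], ["d", "a"]]

def Spec_minimal_coverage (dfs : List (List String)) (out : List (List String)) : Prop :=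
  out = minimal_coverage_alt dfs
instance (dfs : List (List String)) (out : List (List String)) :
    Decidable (Spec_minimal_coverage dfs out) := by unfold Spec_minimal_coverage; infer_instance

-- ===== CLAIM (what is proved, stated in full; the proofs are below) =====
def Claim_equal_minimal_coverage : Prop := ∀ (dfs : List (List String)),
  Dom_minimal_coverage dfs → Pre_minimal_coverage dfs →
  Spec_minimal_coverage dfs (minimal_coverage dfs)

-- ===== LEMMAS AND PROOFS =====

-- proof-only abbreviations
def pvLhsC (df : List String) : List Char := (df.getD 0 "").toList
def pvMsCnt (deps : List (List String)) (clos : List Char) (j : Nat) : Int :=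
  (((PySem.Set.ofList (pvLhsC (deps.getD j []))).filter (fun c => !clos.contains c)).length : Int)

theorem pvRemove_first {α : Type} [BEq α] [LawfulBEq α] (pre suf : List α) (x : α)
    (h : ∀ y ∈ pre, y ≠ x) :
    PySem.List.remove? (pre ++ x :: suf) x = some (pre ++ suf) := by
  induction pre with
  | nil => simp [PySem.List.remove?_cons_self]
  | cons y t ih =>
    have hy : y ≠ x := h y (by simp)
    rw [List.cons_append, PySem.List.remove?_cons_of_ne _ hy, ih (fun z hz => h z (by simp [hz]))]
    rfl


theorem pvDecr_length (missing : List Int) (js : List Nat) :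
    (js.foldl (fun m j => m.set j (m.getD j 0 - 1)) missing).length = missing.length := by
  induction js generalizing missing with
  | nil => rfl
  | cons j t ih => rw [List.foldl_cons, ih, List.length_set]


theorem pvDecr_getD (missing : List Int) (js : List Nat) (hnd : js.Nodup) (j : Nat) :
    (js.foldl (fun m j => m.set j (m.getD j 0 - 1)) missing).getD j 0 =
      if j ∈ js ∧ j < missing.length then missing.getD j 0 - 1 else missing.getD j 0 := by
  induction js generalizing missing with
  | nil => simp
  | cons a t ih =>
    simp only [List.foldl_cons]
    have hnd' := (List.nodup_cons.mp hnd).2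
    have ha : a ∉ t := (List.nodup_cons.mp hnd).1
    rw [ih _ hnd']
    by_cases hj : j ∈ t
    · have hja : j ≠ a := fun e => ha (e ▸ hj)
      simp [hj, List.length_set, List.getD, hja, Ne.symm hja]
    · by_cases hja : j = a
      · subst hja
        by_cases hlt : j < missing.length
        · simp [hj, hlt, List.getD]
        · have : missing.set j (missing.getD j 0 - 1) = missing := by
            apply List.set_eq_of_length_le; omega
          simp [hj, hlt]
      · simp [hj, List.getD, hja, Ne.symm hja]


theorem pvMapRange {α : Type} (cov : List α) (d : α) :
    (List.range cov.length).map (fun j => cov.getD j d) = cov := by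
  apply List.ext_getElem
  · simp
  · intro i h1 h2
    simp only [List.getElem_map, List.getElem_range]
    simp [List.getD, List.getElem?_eq_getElem h2]

theorem pvCovNodup {α β : Type} [BEq α] [LawfulBEq α] (dfs : List β) (f : β → α) :
    ∀ (acc : List α), acc.Nodup →
      (dfs.foldl (fun mc df => if mc.contains (f df) then mc else mc ++ [f df]) acc).Nodup := by
  induction dfs with
  | nil => intro acc h; exact h
  | cons d t ih =>
    intro acc h
    simp only [List.foldl_cons]
    by_cases hc : f d ∈ acc
    · rw [if_pos (by simpa using hc)]
      exact ih acc h
    · rw [if_neg (by simpa using hc)]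
      refine ih _ ?_
      rw [List.nodup_append]
      refine ⟨h, List.nodup_singleton _, ?_⟩
      intro a ha b hb
      simp only [List.mem_singleton] at hb
      subst hb
      exact fun e => hc (e ▸ ha)


theorem pvZipIdxFold {α : Type} (cov : List α) (cond : α × Nat → Bool) :
    cov.zipIdx.foldl (fun res p => if cond p then res ++ [p.1] else res) []
      = (cov.zipIdx.filter cond).map (fun p => p.1) := by
  simpa using PySem.List.foldl_append_if cond (fun p => p.1) cov.zipIdx []


theorem pvZipIdxFilterMap {α : Type} (cov : List α) (q : α → Bool)
    (cond : α × Nat → Bool)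
    (hq : ∀ p ∈ cov.zipIdx, cond p = q p.1) :
    (cov.zipIdx.filter cond).map (fun p => p.1) = cov.filter q := by
  rw [List.filter_congr hq]
  -- goal: (cov.zipIdx.filter (fun p => q p.1)).map (·.1) = cov.filter q
  have gen : ∀ (t : List α) (n : Nat), ((t.zipIdx n).filter (fun p => q p.1)).map (fun p => p.1) = t.filter q := by
    intro t
    induction t with
    | nil => intro n; rfl
    | cons x s ih =>
      intro n
      simp only [List.zipIdx_cons, List.filter_cons]
      by_cases hx : q x
      · simp [hx, ih (n+1)]
      · simp [hx, ih (n+1)]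
  exact gen cov 0


theorem pvFilterNeEraseIdx {α : Type} [BEq α] [LawfulBEq α] (cov : List α) (i : Nat) (h : i < cov.length)
    (hnd : cov.Nodup) (df : α) (hdf : cov[i] = df) :
    cov.filter (fun e => e != df) = cov.eraseIdx i := by
  induction cov generalizing i with
  | nil => simp at h
  | cons x t ih =>
    match i with
    | 0 =>
      have hx : x = df := hdf
      subst hx
      have hxt : x ∉ t := (List.nodup_cons.mp hnd).1
      simp only [List.eraseIdx_cons_zero, List.filter_cons]
      rw [if_neg (by simp)]
      apply List.filter_eq_self.mpr
      intro a ha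
      simp only [bne_iff_ne, ne_eq]
      intro e; exact hxt (e ▸ ha)
    | i + 1 =>
      have h' : i < t.length := by simpa using h
      have hdf' : t[i] = df := by simpa using hdf
      have hx : x ≠ df := by
        intro e
        have : df ∈ t := hdf' ▸ List.getElem_mem h'
        exact (List.nodup_cons.mp hnd).1 (e ▸ this)
      simp only [List.eraseIdx_cons_succ, List.filter_cons]
      rw [if_pos (by simpa using hx)]
      rw [ih i h' (List.nodup_cons.mp hnd).2 hdf']


theorem pvRangeFilterErase {α : Type} (cov : List α) (d : α) (i : Nat) (h : i < cov.length) :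
    ((List.range cov.length).filter (fun j => some j != some i)).map (fun j => cov.getD j d)
      = cov.eraseIdx i := by
  induction cov generalizing i with
  | nil => simp at h
  | cons x t ih =>
    rw [show List.range (x :: t).length = 0 :: (List.range t.length).map (· + 1) by
      simp [List.range_succ_eq_map]]
    simp only [List.filter_cons, List.filter_map]
    match i with
    | 0 =>
      rw [if_neg (by simp)]
      rw [List.filter_congr (l := List.range t.length)
        (q := fun _ => true) (by intro a ha; simp), List.filter_true, List.map_map]
      rw [List.map_congr_left (l := List.range t.length)
        (g := fun j => t.getD j d)
        (by intro a ha; simp only [Function.comp_apply]; simp [List.getD])]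
      rw [pvMapRange t d]
      rfl
    | i + 1 =>
      have h' : i < t.length := by simpa using h
      rw [if_pos (by simp)]
      simp only [List.map_cons]
      rw [List.filter_congr (l := List.range t.length)
        (q := fun j => some j != some i)
        (by intro a ha
            simp only [Function.comp_apply]
            by_cases e : a = i
            · subst e; simp
            · rw [show (some (a+1) != some (i+1)) = true from by simp [e],
                  show (some a != some i) = true from by simp [e]])]
      rw [List.map_map]
      rw [List.map_congr_left (l := (List.range t.length).filter (fun j => some j != some i))
        (g := fun j => t.getD j d)
        (by intro a ha; simp only [Function.comp_apply]; simp [List.getD])]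
      rw [ih i h']
      rfl

theorem pvInnerFold (cs : List Char) (hnd : cs.Nodup) (j : Nat)
    (w : PySem.Dict Char (List Nat)) (c : Char) :
    (cs.foldl (fun w c => w.insert c (w.getD c [] ++ [j])) w).getD c []
      = w.getD c [] ++ (if cs.contains c then [j] else []) := by
  induction cs generalizing w with
  | nil => simp
  | cons a t ih =>
    have ⟨ha, hnd'⟩ := List.nodup_cons.mp hnd
    simp only [List.foldl_cons]
    rw [ih hnd']
    by_cases hc : c = a
    · subst hc
      simp [PySem.Dict.getD_insert, ha]
    · simp [PySem.Dict.getD_insert, hc, List.contains_cons,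
        (show ¬ (a == c) = true by simpa using Ne.symm hc)]


theorem pvGo_getD (deps : List (List String)) : ∀ (j0 : Nat) (w : PySem.Dict Char (List Nat)) (c : Char),
    (pvLhsIndexGo deps j0 w).getD c []
      = w.getD c [] ++ ((List.range deps.length).filter
          (fun k => (pvLhsC (deps.getD k [])).contains c)).map (j0 + ·) := by
  induction deps with
  | nil => intro j0 w c; simp [pvLhsIndexGo]
  | cons d rest ih =>
    intro j0 w c
    rw [pvLhsIndexGo, ih, pvInnerFold _ (PySem.Set.nodup_ofList _) j0 w c]
    rw [show List.range (d :: rest).length = 0 :: (List.range rest.length).map (· + 1) by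
      simp [List.range_succ_eq_map]]
    simp only [List.filter_cons, List.filter_map]
    have hset : List.contains (PySem.Set.ofList (d.getD 0 "").toList) c
        = ((d.getD 0 "").toList).contains c := by
      by_cases h : c ∈ (d.getD 0 "").toList
      · simp [(PySem.Set.mem_ofList _ _).mpr h]
      · have : c ∉ PySem.Set.ofList (d.getD 0 "").toList := fun hh => h ((PySem.Set.mem_ofList _ _).mp hh)
        simp [List.contains_iff_mem, h, this]
    have hc0 : (pvLhsC ((d :: rest).getD 0 [])).contains c = ((d.getD 0 "").toList).contains c := rfl
    rw [hset, hc0]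
    have hfun : ((fun x => j0 + x) ∘ fun x => x + 1) = (fun x => j0 + 1 + x) :=
      funext (fun a => by simp only [Function.comp_apply]; omega)
    have hpred : ((fun k => (pvLhsC ((d :: rest).getD k [])).contains c) ∘ fun x => x + 1)
        = (fun k => (pvLhsC (rest.getD k [])).contains c) :=
      funext (fun a => by simp only [Function.comp_apply]; rfl)
    by_cases hd : ((d.getD 0 "").toList).contains c
    · rw [if_pos hd, if_pos hd]
      simp only [List.map_cons, List.map_map, hfun, hpred, Nat.add_zero]
      rw [List.append_assoc]
      rfl
    · rw [if_neg hd, if_neg hd]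
      simp only [List.map_map, hfun, hpred, List.append_nil]


theorem pvLhsIndex_getD (deps : List (List String)) (c : Char) :
    (pvLhsIndex deps).getD c []
      = (List.range deps.length).filter (fun k => (pvLhsC (deps.getD k [])).contains c) := by
  rw [pvLhsIndex, pvGo_getD]
  simp


theorem pvLhsIndex_mem (deps : List (List String)) (c : Char) (j : Nat) :
    j ∈ (pvLhsIndex deps).getD c [] ↔ j < deps.length ∧ c ∈ pvLhsC (deps.getD j []) := by
  simp [pvLhsIndex_getD, List.mem_filter]


theorem pvLhsIndex_nodup (deps : List (List String)) (c : Char) :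
    ((pvLhsIndex deps).getD c []).Nodup := by
  rw [pvLhsIndex_getD]
  exact (List.nodup_range).filter _

theorem pvContains_append (clos : List Char) (c x : Char) :
    (clos ++ [c]).contains x = (clos.contains x || (x == c)) := by
  simp [List.contains_iff_mem]
  tauto


theorem pvMsCnt_new_mem (deps : List (List String)) (clos : List Char) (c : Char)
    (hc : clos.contains c = false) (j : Nat) (hmem : c ∈ pvLhsC (deps.getD j [])) :
    pvMsCnt deps (clos ++ [c]) j = pvMsCnt deps clos j - 1 := by
  unfold pvMsCnt
  set S := PySem.Set.ofList (pvLhsC (deps.getD j [])) with hS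
  have hndS : S.Nodup := PySem.Set.nodup_ofList _
  have hcS : c ∈ S := (PySem.Set.mem_ofList _ _).mpr hmem
  have h1 : S.filter (fun x => !(clos ++ [c]).contains x)
      = (S.filter (fun x => !clos.contains x)).filter (fun x => !(x == c)) := by
    rw [List.filter_filter]
    apply List.filter_congr
    intro x hx
    rw [pvContains_append]
    cases hcx : clos.contains x <;> cases hxc : (x == c) <;> simp
  have hc' : c ∉ clos := by simpa [List.contains_iff_mem] using hc
  have hT : c ∈ S.filter (fun x => !clos.contains x) := List.mem_filter.mpr ⟨hcS, by simp [List.contains_iff_mem, hc']⟩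
  have hndT : (S.filter (fun x => !clos.contains x)).Nodup := hndS.filter _
  have h2 : (S.filter (fun x => !clos.contains x)).filter (fun x => !(x == c))
      = (S.filter (fun x => !clos.contains x)).erase c := by
    rw [List.Nodup.erase_eq_filter hndT]
    apply List.filter_congr
    intro x hx
    by_cases e : x = c
    · subst e; simp
    · simp [bne, Bool.not_not]
  rw [h1, h2, List.length_erase_of_mem hT]
  have : 1 ≤ (S.filter (fun x => !clos.contains x)).length := List.length_pos_of_mem hT
  omega


theorem pvMsCnt_not_mem (deps : List (List String)) (clos : List Char) (c : Char)
    (j : Nat) (hmem : c ∉ pvLhsC (deps.getD j [])) :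
    pvMsCnt deps (clos ++ [c]) j = pvMsCnt deps clos j := by
  unfold pvMsCnt
  congr 1
  apply congrArg
  apply List.filter_congr
  intro x hx
  have hxc : x ≠ c := fun e => hmem (e ▸ ((PySem.Set.mem_ofList _ _).mp hx))
  rw [pvContains_append]
  simp [hxc]


theorem pvMsCnt_old (deps : List (List String)) (clos : List Char) (c : Char)
    (hc : clos.contains c = true) (j : Nat) :
    pvMsCnt deps (clos ++ [c]) j = pvMsCnt deps clos j := by
  unfold pvMsCnt
  congr 1
  apply congrArg
  apply List.filter_congr
  intro x hx
  rw [pvContains_append]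
  by_cases hxc : x = c
  · subst hxc; simp [hc, List.contains_iff_mem.mp hc]
  · simp [hxc]

theorem pvAddChars_inv (deps : List (List String)) (add : List Char)
    (clos : List Char) (inset : PySem.Set Char) (missing : List Int)
    (hins : ∀ c, PySem.Set.contains inset c = clos.contains c)
    (hlen : missing.length = deps.length)
    (hmiss : ∀ j, j < deps.length → missing.getD j 0 = pvMsCnt deps clos j) :
    (∀ c, PySem.Set.contains (pvAddChars (pvLhsIndex deps) add inset missing).1 c
        = (clos ++ add).contains c) ∧
    (pvAddChars (pvLhsIndex deps) add inset missing).2.length = deps.length ∧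
    (∀ j, j < deps.length →
      (pvAddChars (pvLhsIndex deps) add inset missing).2.getD j 0 = pvMsCnt deps (clos ++ add) j) := by
  induction add generalizing clos inset missing with
  | nil =>
    refine ⟨fun c => by simpa using hins c, hlen, fun j hj => by simpa using hmiss j hj⟩
  | cons c rest ih =>
    have step : pvAddChars (pvLhsIndex deps) (c :: rest) inset missing
        = pvAddChars (pvLhsIndex deps) rest
            (if PySem.Set.contains inset c then inset else PySem.Set.add inset c)
            (if PySem.Set.contains inset c then missing
             else pvDecr missing ((pvLhsIndex deps).getD c [])) := by
      unfold pvAddChars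
      rw [List.foldl_cons]
      by_cases hc : PySem.Set.contains inset c
      · have hc' : c ∈ inset := by simpa [PySem.Set.contains, List.contains_iff_mem] using hc
        simp [hc, hc']
      · have hc' : c ∉ inset := by simpa [PySem.Set.contains, List.contains_iff_mem] using hc
        simp [hc, hc']
    rw [step]
    by_cases hc : PySem.Set.contains inset c
    · rw [if_pos hc, if_pos hc]
      have hclos : clos.contains c = true := (hins c) ▸ hc
      have h1 := ih (clos ++ [c]) inset missing
        (fun x => by
          rw [pvContains_append, hins x]
          by_cases e : x = c
          · subst e; simp [hclos, List.contains_iff_mem.mp hclos]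
          · simp [e])
        hlen
        (fun j hj => by rw [hmiss j hj, pvMsCnt_old deps clos c hclos j])
      rw [show clos ++ c :: rest = (clos ++ [c]) ++ rest by simp]
      exact h1
    · rw [if_neg hc, if_neg hc]
      have hclos : clos.contains c = false := by rw [← hins c]; simpa using hc
      have haddc : ∀ x, PySem.Set.contains (PySem.Set.add inset c) x = (clos ++ [c]).contains x := by
        intro x
        rw [pvContains_append]
        unfold PySem.Set.add
        rw [if_neg hc]
        unfold PySem.Set.contains
        rw [pvContains_append]
        exact congrArg (fun b => b || (x == c)) (hins x)
      have hlen' : (pvDecr missing ((pvLhsIndex deps).getD c [])).length = deps.length := by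
        unfold pvDecr; rw [pvDecr_length, hlen]
      have hmiss' : ∀ j, j < deps.length →
          (pvDecr missing ((pvLhsIndex deps).getD c [])).getD j 0 = pvMsCnt deps (clos ++ [c]) j := by
        intro j hj
        unfold pvDecr
        rw [pvDecr_getD missing _ (pvLhsIndex_nodup deps c) j]
        by_cases hm : c ∈ pvLhsC (deps.getD j [])
        · rw [if_pos ⟨(pvLhsIndex_mem deps c j).mpr ⟨hj, hm⟩, by omega⟩]
          rw [hmiss j hj, pvMsCnt_new_mem deps clos c hclos j hm]
        · rw [if_neg (by
            intro ⟨hmem, _⟩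
            exact hm ((pvLhsIndex_mem deps c j).mp hmem).2)]
          rw [hmiss j hj, pvMsCnt_not_mem deps clos c j hm]
      have h1 := ih (clos ++ [c]) (PySem.Set.add inset c)
        (pvDecr missing ((pvLhsIndex deps).getD c [])) haddc hlen' hmiss'
      rw [show clos ++ c :: rest = (clos ++ [c]) ++ rest by simp]
      exact h1

theorem pvPred_eq (deps : List (List String)) (clos : List Char) (missing : List Int)
    (hmiss : ∀ j, j < deps.length → missing.getD j 0 = pvMsCnt deps clos j)
    (j : Nat) (hj : j < deps.length) :
    (missing.getD j 0 == 0)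
      = ((deps.getD j []).getD 0 "").toList.all (fun a => clos.contains a) := by
  rw [hmiss j hj]
  by_cases h : ((deps.getD j []).getD 0 "").toList.all (fun a => clos.contains a)
  · rw [h]
    have : (PySem.Set.ofList (pvLhsC (deps.getD j []))).filter (fun c => !clos.contains c) = [] := by
      apply List.filter_eq_nil_iff.mpr
      intro x hx
      have hxl : x ∈ pvLhsC (deps.getD j []) := (PySem.Set.mem_ofList _ _).mp hx
      have hx2 : x ∈ clos := List.contains_iff_mem.mp (List.all_eq_true.mp h x hxl)
      simp [hx2]
    unfold pvMsCnt
    rw [this]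
    rfl
  · have hfalse := Bool.eq_false_iff.mpr h
    rw [hfalse]
    obtain ⟨a, ha, hna⟩ := List.all_eq_false.mp hfalse
    have hmemf : a ∈ (PySem.Set.ofList (pvLhsC (deps.getD j []))).filter (fun c => !clos.contains c) :=
      List.mem_filter.mpr ⟨(PySem.Set.mem_ofList _ _).mpr ha,
        by simpa [List.contains_iff_mem] using hna⟩
    have hpos := List.length_pos_of_mem hmemf
    unfold pvMsCnt
    rw [beq_eq_false_iff_ne]
    intro e
    rw [Int.natCast_eq_zero] at e
    omega

theorem pvFind_corr (deps : List (List String)) (clos : List Char) (missing : List Int)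
    (alive : List Nat)
    (halive : ∀ j ∈ alive, j < deps.length)
    (hmiss : ∀ j, j < deps.length → missing.getD j 0 = pvMsCnt deps clos j) :
    pvFindDF (alive.map (fun j => deps.getD j [])) clos
      = (alive.find? (fun j => missing.getD j 0 == 0)).map (fun j => deps.getD j []) := by
  induction alive with
  | nil => rfl
  | cons j t ih =>
    have hj : j < deps.length := halive j (by simp)
    have key := pvPred_eq deps clos missing hmiss j hj
    rw [List.map_cons, pvFindDF, List.find?_cons, ← key]
    cases hb : (missing.getD j 0 == 0) with
    | true => simp only [hb, if_true, cond_true, Option.map_some]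
    | false =>
      simp only [hb, if_false, cond_false]
      exact ih (fun x hx => halive x (by simp [hx]))

theorem pvLoop_eq (deps : List (List String)) :
    ∀ (fa fb : Nat) (alive : List Nat) (clos : List Char) (inset : PySem.Set Char)
      (missing : List Int),
      alive.length < fa → alive.length < fb →
      (∀ j ∈ alive, j < deps.length) →
      (∀ c, PySem.Set.contains inset c = clos.contains c) →
      missing.length = deps.length →
      (∀ j, j < deps.length → missing.getD j 0 = pvMsCnt deps clos j) →
      pvClosLoopA fa (alive.map (fun j => deps.getD j [])) clos
        = pvClosLoopB fb deps (pvLhsIndex deps) clos inset missing alive := by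
  intro fa
  induction fa with
  | zero => intro fb alive clos inset missing h1; omega
  | succ fa ih =>
    intro fb alive clos inset missing h1 h2 halive hins hlen hmiss
    obtain ⟨fb', rfl⟩ : ∃ fb', fb = fb' + 1 := ⟨fb - 1, by omega⟩
    rw [pvClosLoopA, pvClosLoopB]
    rw [pvFind_corr deps clos missing alive halive hmiss]
    cases hfind : alive.find? (fun j => missing.getD j 0 == 0) with
    | none => rfl
    | some i =>
      simp only [Option.map_some]
      obtain ⟨hpi, pre, suf, heq, hpre⟩ := List.find?_eq_some_iff_append.mp hfind
      have hi : i < deps.length := halive i (heq ▸ (by simp))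
      -- the removed element is at the found position on both sides
      have hkey : ∀ b, b ∈ alive → (missing.getD b 0 == 0)
          = ((deps.getD b []).getD 0 "").toList.all (fun a => clos.contains a) :=
        fun b hb => pvPred_eq deps clos missing hmiss b (halive b hb)
      have hremB : (PySem.List.remove? alive i).getD alive = pre ++ suf := by
        rw [heq, pvRemove_first pre suf i]
        · rfl
        · intro y hy e
          subst e
          have h1' := hpre y hy
          rw [hpi] at h1'
          simp at h1'
      have hmapeq : alive.map (fun j => deps.getD j [])
          = pre.map (fun j => deps.getD j []) ++ (deps.getD i []) :: suf.map (fun j => deps.getD j []) := by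
        rw [heq]; simp
      have hremA : (PySem.List.remove? (alive.map (fun j => deps.getD j [])) (deps.getD i [])).getD
            (alive.map (fun j => deps.getD j []))
          = (pre ++ suf).map (fun j => deps.getD j []) := by
        rw [hmapeq, pvRemove_first _ _ _ ?_]
        · simp
        · intro y hy e
          obtain ⟨b, hb, rfl⟩ := List.mem_map.mp hy
          have hbmem : b ∈ alive := heq ▸ List.mem_append_left _ hb
          have hfb : (missing.getD b 0 == 0) = false := by simpa using hpre b hb
          have hti : (missing.getD i 0 == 0) = true := hpi
          rw [hkey b hbmem] at hfb
          rw [hkey i (heq ▸ (by simp))] at hti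
          rw [e] at hfb
          rw [hfb] at hti
          exact Bool.false_ne_true hti
      have hchange : ((deps.getD i []).getD 1 "").toList.filter (fun c => !PySem.Set.contains inset c)
          = ((deps.getD i []).getD 1 "").toList.filter (fun a => !clos.contains a) := by
        apply List.filter_congr
        intro x _
        rw [hins x]
      set change := ((deps.getD i []).getD 1 "").toList.filter (fun a => !clos.contains a) with hchdef
      have hclosure' : (if 0 < change.length then clos ++ change else clos) = clos ++ change := by
        by_cases hl : 0 < change.length
        · rw [if_pos hl]
        · rw [if_neg hl]
          have : change = [] := List.length_eq_zero_iff.mp (by omega)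
          rw [this, List.append_nil]
      obtain ⟨hins', hlen', hmiss'⟩ := pvAddChars_inv deps change clos inset missing hins hlen hmiss
      have hlenpre : alive.length = pre.length + suf.length + 1 := by rw [heq]; simp; omega
      have halive' : ∀ j ∈ pre ++ suf, j < deps.length := by
        intro j hj
        rcases List.mem_append.mp hj with h | h
        · exact halive j (heq ▸ List.mem_append_left _ h)
        · exact halive j (heq ▸ (by simp [h]))
      have := ih fb' (pre ++ suf) (clos ++ change)
        (pvAddChars (pvLhsIndex deps) change inset missing).1
        (pvAddChars (pvLhsIndex deps) change inset missing).2
        (by simp; omega) (by simp; omega) halive' hins' hlen' hmiss'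
      rw [hchange, hclosure', hremA, hremB]
      exact this

theorem pvClosure_eq (deps : List (List String)) (eps : List (List String))
    (attrs : String) (skip : Option Nat)
    (heps : eps = ((List.range deps.length).filter (fun j => some j != skip)).map
      (fun j => deps.getD j [])) :
    pvClosureAttributesA eps attrs = pvClosureB deps (pvLhsIndex deps) attrs skip := by
  have hsetc : ∀ (l : List Char) (c : Char),
      PySem.Set.contains (PySem.Set.ofList l) c = l.contains c := by
    intro l c
    by_cases h : c ∈ l
    · have h1 : c ∈ PySem.Set.ofList l := (PySem.Set.mem_ofList _ _).mpr h
      unfold PySem.Set.contains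
      simp [List.contains_iff_mem, h, h1]
    · have h1 : c ∉ PySem.Set.ofList l := fun hh => h ((PySem.Set.mem_ofList _ _).mp hh)
      unfold PySem.Set.contains
      simp [List.contains_iff_mem, h, h1]
  set alive0 := (List.range deps.length).filter (fun j => some j != skip) with halive0
  have hlen0 : eps.length = alive0.length := by rw [heps]; simp
  have hle : alive0.length ≤ deps.length := by
    calc alive0.length ≤ (List.range deps.length).length := List.length_filter_le _ _
    _ = deps.length := List.length_range
  have hloop := pvLoop_eq deps (eps.length + 1) (deps.length + 1) alive0 attrs.toList
    (PySem.Set.ofList attrs.toList)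
    (deps.map (fun d => ((PySem.Set.diff (PySem.Set.ofList (d.getD 0 "").toList)
      (PySem.Set.ofList attrs.toList)).length : Int)))
    (by omega) (by omega)
    (by intro j hj
        have := List.mem_filter.mp (halive0 ▸ hj)
        exact List.mem_range.mp this.1)
    (fun c => hsetc attrs.toList c)
    (by simp)
    (by intro j hj
        rw [List.getD, List.getElem?_map, List.getElem?_eq_getElem hj]
        simp only [Option.map_some, Option.getD_some]
        unfold pvMsCnt PySem.Set.diff pvLhsC
        rw [show deps.getD j [] = deps[j] from by
          rw [List.getD, List.getElem?_eq_getElem hj]; rfl]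
        congr 1
        congr 1
        apply List.filter_congr
        intro x _
        rw [show (PySem.Set.ofList attrs.toList).contains x
            = PySem.Set.contains (PySem.Set.ofList attrs.toList) x from rfl,
          hsetc attrs.toList x])
  unfold pvClosureAttributesA pvClosureB
  rw [heps] at hloop ⊢
  rw [hloop]

-- ===== VERDICT (by name: the statement is the Claim_ definition above) =====
theorem minimal_coverage_spec : Claim_equal_minimal_coverage := by
  unfold Claim_equal_minimal_coverage Spec_minimal_coverage
  intro dfs _ _
  have hclos1 : ∀ s : String, pvClosureAttributesA (dfs ++ []) s
      = pvClosureB dfs (pvLhsIndex dfs) s none := by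
    intro s
    rw [List.append_nil]
    apply pvClosure_eq
    rw [List.filter_congr (p := fun j => some j != (none : Option Nat)) (q := fun _ => true)
      (fun a _ => rfl), List.filter_true, pvMapRange dfs []]
  simp only [minimal_coverage, minimal_coverage_alt]
  simp only [hclos1]
  set cov := dfs.foldl (fun mc df =>
    if mc.contains [df.getD 0 "", pvClosureB dfs (pvLhsIndex dfs) (df.getD 0 "") none] then mc
    else mc ++ [[df.getD 0 "", pvClosureB dfs (pvLhsIndex dfs) (df.getD 0 "") none]]) [] with hcovdef
  have hnodup : cov.Nodup := pvCovNodup dfs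
    (fun df => [df.getD 0 "", pvClosureB dfs (pvLhsIndex dfs) (df.getD 0 "") none]) [] List.nodup_nil
  set sat := fun df : List String => pvIsSatisfiedA (cov.filter (fun e => e != df)) df with hsatdef
  have hA : cov.foldl (fun acc df => if sat df then acc ++ [df] else acc) []
      = cov.filter sat := by
    simpa using PySem.List.foldl_append_if sat id cov []
  have hcontains : ∀ df ∈ cov, (cov.filter sat).contains df = sat df := by
    intro df hdf
    by_cases h : sat df
    · simp [List.contains_iff_mem, List.mem_filter.mpr ⟨hdf, h⟩, h]
    · have : df ∉ cov.filter sat := fun hm => h (List.mem_filter.mp hm).2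
      simp [List.contains_iff_mem, this, h]
  have hAside : cov.filter (fun df => !(cov.filter sat).contains df)
      = cov.filter (fun df => !sat df) :=
    List.filter_congr (fun df hdf => by rw [hcontains df hdf])
  have hq : ∀ p ∈ cov.zipIdx,
      (!((p.1.getD 1 "").toList.all
          (fun c => (pvClosureB cov (pvLhsIndex cov) (p.1.getD 0 "") (some p.2)).toList.contains c)))
        = !sat p.1 := by
    intro p hp
    obtain ⟨df, i⟩ := p
    obtain ⟨-, hi, hdf⟩ := List.mem_zipIdx hp
    simp only [Nat.zero_add, Nat.sub_zero] at hi hdf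
    have hclos2 : pvClosureB cov (pvLhsIndex cov) (df.getD 0 "") (some i)
        = pvClosureAttributesA (cov.filter (fun e => e != df)) (df.getD 0 "") := by
      refine (pvClosure_eq cov _ _ (some i) ?_).symm
      rw [pvFilterNeEraseIdx cov i hi hnodup df hdf.symm, ← pvRangeFilterErase cov [] i hi]
    simp only [hclos2, hsatdef, pvIsSatisfiedA]
    cases h : ((df.getD 1 "").toList.all
        (fun a => (pvClosureAttributesA (cov.filter (fun e => e != df)) (df.getD 0 "")).toList.contains a)) <;>
      simp [h]
  rw [hA, hAside, pvZipIdxFold cov _, pvZipIdxFilterMap cov (fun df => !sat df) _ hq]
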